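-- pv_equiv track=rewrite | github.com/rizac/stream2segment | stream2segment/download/modules/datacenters.py | eidarsiter
-- ===== SOURCE A (Python) =====
-- def eidarsiter(responsetext):
--     """Iterator yielding the tuple (url, postdata) for each datacenter found in
--     `responsetext`
--
--     :param responsetext: (str) the EIDA routing service response text
--     """
--     # Yielding strings consumes less memory than using `str.split`... although
--     # the code below it's not super readable (maybe change in the future)
--     start = 0
--     textlen = len(responsetext)
--     while start < textlen:
--         end = responsetext.find("\n\n", start)
--         if end < 0:
--             end = textlen
--         mid = responsetext.find("\n", start, end)  # note: now we set a new value to idx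
--         if mid > -1:
--             url, postdata = responsetext[start:mid].strip(), responsetext[mid:end].strip()
--             if url and postdata:
--                 yield url, postdata
--         start = end + 2
-- ===== SOURCE B (Python) =====
-- def eidarsiter(responsetext):
--     """Iterator yielding the tuple (url, postdata) for each datacenter found in
--     `responsetext` (EIDA routing service response text)."""
--     for block in responsetext.split("\n\n"):
--         nl = block.find("\n")
--         if nl < 0:
--             continue
--         url, postdata = block[:nl].strip(), block[nl:].strip()
--         if url and postdata:
--             yield url, postdata
-- ===== Notes on version B (the rewrite author's own statement) =====
-- stated objective: simpler
-- what changed: B replaces A's manual start/end/find index-scanning loop over the whole text by splitting the text once at blank-line separators and handling each block independently with a single first-newline split.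
import Mathlib
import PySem

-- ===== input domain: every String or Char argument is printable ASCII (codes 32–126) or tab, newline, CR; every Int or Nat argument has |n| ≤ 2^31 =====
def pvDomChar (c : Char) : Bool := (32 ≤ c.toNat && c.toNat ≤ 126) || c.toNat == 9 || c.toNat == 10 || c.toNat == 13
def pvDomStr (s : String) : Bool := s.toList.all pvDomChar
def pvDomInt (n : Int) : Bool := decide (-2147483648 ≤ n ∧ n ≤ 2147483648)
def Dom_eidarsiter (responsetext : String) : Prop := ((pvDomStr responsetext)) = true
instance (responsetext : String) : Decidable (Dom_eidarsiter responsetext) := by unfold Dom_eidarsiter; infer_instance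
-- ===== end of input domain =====

-- B splits the text into "\n\n"-separated blocks once and handles each block independently
-- (simpler decomposition); A's generator is materialised as a list on both sides.

-- ===== PORT A =====
-- A's while-loop over `start`; fuel = len+1 strictly bounds the iteration count
-- (start grows by at least 2 per iteration), so the port computes exactly A's loop.
def eidarsiterGo (s : List Char) (fuel : Nat) (start : Int) : List (String × String) :=
  match fuel with
  | 0 => []
  | fuel + 1 =>
    if start < (s.length : Int) then
      let end0 := PySem.Chars.findFrom s ['\n', '\n'] start
      let e := if end0 < 0 then (s.length : Int) else end0
      let mid := PySem.Chars.findFrom s ['\n'] start (some e)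
      let rest := eidarsiterGo s fuel (e + 2)
      if mid > -1 then
        let url := PySem.Chars.strip (PySem.List.slice s (some start) (some mid))
        let postdata := PySem.Chars.strip (PySem.List.slice s (some mid) (some e))
        if url ≠ [] ∧ postdata ≠ [] then (String.ofList url, String.ofList postdata) :: rest else rest
      else rest
    else []

def eidarsiter (responsetext : String) : List (String × String) :=
  eidarsiterGo responsetext.toList (responsetext.toList.length + 1) 0

-- ===== PORT B =====
-- per-block body of B's for-loop: yield (url, postdata) or nothing
def eidarsiterBlock (block : List Char) : Option (String × String) :=
  let nl := PySem.Chars.find block ['\n']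
  if nl < 0 then none
  else
    let url := PySem.Chars.strip (PySem.List.slice block none (some nl))
    let postdata := PySem.Chars.strip (PySem.List.slice block (some nl) none)
    if url ≠ [] ∧ postdata ≠ [] then some (String.ofList url, String.ofList postdata) else none

def eidarsiter_alt (responsetext : String) : List (String × String) :=
  (PySem.Chars.splitOn responsetext.toList ['\n', '\n']).filterMap eidarsiterBlock

-- ===== PRECONDITION & SPEC =====
def Spec_eidarsiter (responsetext : String) (out : List (String × String)) : Prop := out = eidarsiter_alt responsetext
instance (responsetext : String) (out : List (String × String)) : Decidable (Spec_eidarsiter responsetext out) := by unfold Spec_eidarsiter; infer_instance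

-- ===== CLAIM (what is proved, stated in full; the proofs are below) =====
def Claim_equal_eidarsiter : Prop := ∀ (responsetext : String), Dom_eidarsiter responsetext → Spec_eidarsiter responsetext (eidarsiter responsetext)

-- ===== LEMMAS AND PROOFS =====

-- find.go either fails for every offset or finds the same position shifted by the offset
theorem pv_findgo_cases (sub : List Char) (l : List Char) :
    (∀ k : Nat, PySem.Chars.find.go sub l k = -1) ∨
    (∃ m : Nat, ∀ k : Nat, PySem.Chars.find.go sub l k = ((m + k : Nat) : Int)) := by
  induction l with
  | nil =>
    by_cases he : sub.isEmpty
    · right; exact ⟨0, fun k => by simp [PySem.Chars.find.go, he]⟩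
    · left; intro k; simp [PySem.Chars.find.go, he]
  | cons c rest ih =>
    by_cases hp : sub.isPrefixOf (c :: rest)
    · right; exact ⟨0, fun k => by simp [PySem.Chars.find.go, hp]⟩
    · rcases ih with h | ⟨m, hm⟩
      · left; intro k; simp only [PySem.Chars.find.go, hp]; exact h (k + 1)
      · right; refine ⟨m + 1, fun k => ?_⟩
        simp only [PySem.Chars.find.go, hp]
        rw [hm (k + 1)]; push_cast; ring

theorem pv_find_cons (sub : List Char) (c : Char) (rest : List Char) :
    PySem.Chars.find (c :: rest) sub =
      if sub.isPrefixOf (c :: rest) then 0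
      else if PySem.Chars.find rest sub = -1 then -1 else PySem.Chars.find rest sub + 1 := by
  by_cases hp : sub.isPrefixOf (c :: rest)
  · simp [PySem.Chars.find, PySem.Chars.find.go, hp]
  · simp only [PySem.Chars.find, PySem.Chars.find.go, hp]
    rcases pv_findgo_cases sub rest with h | ⟨m, hm⟩
    · rw [h 1, h 0]; simp
    · rw [hm 1, hm 0]; push_cast; simp

theorem pv_find_nil_sep : PySem.Chars.find [] ['\n', '\n'] = -1 := by
  simp [PySem.Chars.find, PySem.Chars.find.go]

-- the blocks of t when split on "\n\n", phrased through `find` (first occurrence)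
def pvBlocks (t : List Char) : List (List Char) :=
  let f := PySem.Chars.find t ['\n', '\n']
  if h : f < 0 then [t]
  else t.take f.toNat :: pvBlocks (t.drop (f.toNat + 2))
termination_by t.length
decreasing_by
  have h0 : 0 ≤ PySem.Chars.find t ['\n', '\n'] := by omega
  have := (PySem.Chars.find_spec (s := t) (sub := ['\n', '\n']) h0).1
  have hlen := this.length_le
  simp only [List.length_cons, List.length_nil, List.length_drop] at hlen ⊢
  omega

theorem pvBlocks_ne_nil (t : List Char) : pvBlocks t ≠ [] := by
  rw [pvBlocks]
  split <;> simp

theorem pvBlocks_nil : pvBlocks [] = [[]] := by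
  rw [pvBlocks]; simp [pv_find_nil_sep]

theorem pvBlocks_prefix (l : List Char) (hp : List.isPrefixOf ['\n', '\n'] l = true) :
    pvBlocks l = [] :: pvBlocks (l.drop 2) := by
  cases l with
  | nil => simp [List.isPrefixOf] at hp
  | cons c rest =>
    have hf : PySem.Chars.find (c :: rest) ['\n', '\n'] = 0 := by
      simp [PySem.Chars.find, PySem.Chars.find.go, hp]
    rw [pvBlocks]; simp [hf]

theorem pvBlocks_cons_not_prefix (c : Char) (rest : List Char)
    (hp : List.isPrefixOf ['\n', '\n'] (c :: rest) = false) :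
    pvBlocks (c :: rest) =
      match pvBlocks rest with
      | [] => [[c]]
      | b :: bs => (c :: b) :: bs := by
  have hf := pv_find_cons ['\n', '\n'] c rest
  rw [hp] at hf; simp only [Bool.false_eq_true, if_false] at hf
  by_cases h1 : PySem.Chars.find rest ['\n', '\n'] = -1
  · rw [h1] at hf; simp only [if_pos] at hf
    have hr : pvBlocks rest = [rest] := by
      rw [pvBlocks, dif_pos (by rw [h1]; norm_num)]
    rw [hr]
    conv_lhs => rw [pvBlocks]
    rw [dif_pos (by rw [hf]; norm_num)]
  · have h0 : 0 ≤ PySem.Chars.find rest ['\n', '\n'] := by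
      have := PySem.Chars.neg_one_le_find rest ['\n', '\n']; omega
    obtain ⟨fn, hfn⟩ : ∃ fn : Nat, PySem.Chars.find rest ['\n', '\n'] = (fn : Int) :=
      ⟨(PySem.Chars.find rest ['\n', '\n']).toNat, by omega⟩
    rw [hfn, if_neg (by omega : ¬ ((fn : Int) = -1))] at hf
    have hr : pvBlocks rest = rest.take fn :: pvBlocks (rest.drop (fn + 2)) := by
      conv_lhs => rw [pvBlocks]
      rw [hfn, dif_neg (by omega : ¬ ((fn : Int) < 0)),
          (by omega : ((fn : Int)).toNat = fn)]
    rw [hr]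
    conv_lhs => rw [pvBlocks]
    rw [hf, dif_neg (by omega : ¬ ((fn : Int) + 1 < 0)),
        (by omega : ((fn : Int) + 1).toNat = fn + 1)]
    simp only [List.take_succ_cons, List.drop_succ_cons]

theorem pv_splitOn_go (fuel : Nat) :
    ∀ (l cur : List Char) (acc : List (List Char)), l.length ≤ fuel →
      PySem.Chars.splitOn.go ['\n', '\n'] fuel l cur acc =
        acc.reverse ++
          (match pvBlocks l with
           | [] => [cur.reverse]
           | b :: bs => (cur.reverse ++ b) :: bs) := by
  induction fuel with
  | zero =>
    intro l cur acc h
    have : l = [] := by cases l <;> simp_all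
    subst this
    simp [PySem.Chars.splitOn.go, pvBlocks_nil]
  | succ fuel ih =>
    intro l cur acc h
    cases l with
    | nil => simp [PySem.Chars.splitOn.go, pvBlocks_nil]
    | cons c rest =>
      by_cases hp : List.isPrefixOf ['\n', '\n'] (c :: rest)
      · rw [show PySem.Chars.splitOn.go ['\n', '\n'] (fuel + 1) (c :: rest) cur acc =
            PySem.Chars.splitOn.go ['\n', '\n'] fuel ((c :: rest).drop 2) [] (cur.reverse :: acc) by
              simp [PySem.Chars.splitOn.go, hp]]
        rw [ih ((c :: rest).drop 2) [] (cur.reverse :: acc) (by simp at h ⊢; omega)]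
        rw [pvBlocks_prefix (c :: rest) hp]
        rcases hb : pvBlocks ((c :: rest).drop 2) with _ | ⟨b, bs⟩
        · exact absurd hb (pvBlocks_ne_nil _)
        · simp
      · rw [show PySem.Chars.splitOn.go ['\n', '\n'] (fuel + 1) (c :: rest) cur acc =
            PySem.Chars.splitOn.go ['\n', '\n'] fuel rest (c :: cur) acc by
              simp [PySem.Chars.splitOn.go, hp]]
        rw [ih rest (c :: cur) acc (by simp at h; omega)]
        rw [pvBlocks_cons_not_prefix c rest (Bool.eq_false_iff.mpr hp)]
        rcases hb : pvBlocks rest with _ | ⟨b, bs⟩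
        · exact absurd hb (pvBlocks_ne_nil _)
        · simp

theorem pv_splitOn_eq (t : List Char) :
    PySem.Chars.splitOn t ['\n', '\n'] = pvBlocks t := by
  rw [PySem.Chars.splitOn, pv_splitOn_go (t.length + 1) t [] [] (by omega)]
  rcases hb : pvBlocks t with _ | ⟨b, bs⟩
  · exact absurd hb (pvBlocks_ne_nil _)
  · simp

-- A's loop as a recursion on the unprocessed suffix
def pvProc (t : List Char) : List (String × String) :=
  let f := PySem.Chars.find t ['\n', '\n']
  if _h : f < 0 then (eidarsiterBlock t).toList
  else (eidarsiterBlock (t.take f.toNat)).toList ++ pvProc (t.drop (f.toNat + 2))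
termination_by t.length
decreasing_by
  have h0 : 0 ≤ PySem.Chars.find t ['\n', '\n'] := by omega
  have := (PySem.Chars.find_spec (s := t) (sub := ['\n', '\n']) h0).1
  have hlen := this.length_le
  simp only [List.length_cons, List.length_nil, List.length_drop] at hlen ⊢
  omega

theorem pvProc_nil : pvProc [] = [] := by
  rw [pvProc]
  simp [eidarsiterBlock, PySem.Chars.find, PySem.Chars.find.go]

theorem pv_proc_filterMap (t : List Char) :
    pvProc t = (pvBlocks t).filterMap eidarsiterBlock := by
  induction t using pvProc.induct with
  | case1 t f hf =>
    rw [pvProc, pvBlocks, dif_pos hf, dif_pos hf]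
    rcases hb : eidarsiterBlock t with _ | p <;> simp [hb]
  | case2 t f hf ih =>
    rw [pvProc, pvBlocks, dif_neg hf, dif_neg hf, ih]
    rcases hb : eidarsiterBlock (t.take (PySem.Chars.find t ['\n', '\n']).toNat) with _ | p <;>
      simp [hb] <;> rfl

-- A's loop, once started past the end of the text, yields nothing
theorem pv_goA_past (s : List Char) (fuel : Nat) (st : Int) (h : (s.length : Int) ≤ st) :
    eidarsiterGo s fuel st = [] := by
  cases fuel with
  | zero => rfl
  | succ fuel => rw [eidarsiterGo, if_neg (by omega)]

theorem pv_findFrom_some (s sub : List Char) (k m : Nat) (hk : k ≤ m) (hm : m ≤ s.length) :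
    PySem.Chars.findFrom s sub (k : Int) (some (m : Int)) =
      if PySem.Chars.find ((s.drop k).take (m - k)) sub = -1 then -1
      else (k : Int) + PySem.Chars.find ((s.drop k).take (m - k)) sub := by
  simp only [PySem.Chars.findFrom]
  rw [if_neg (show ¬ ((s.length : Int) < (m : Int)) by omega),
      if_neg (show ¬ ((m : Int) < 0) by omega),
      if_neg (show ¬ ((k : Int) < 0) by omega),
      if_neg (show ¬ ((m : Int) < (k : Int)) by omega)]
  rw [Int.toNat_natCast, Int.toNat_natCast, List.drop_take]

-- one iteration of A's loop on the block s[k:m] equals B's per-block body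
theorem pv_block_eq (s : List Char) (k m : Nat) (hk : k ≤ m) (hm : m ≤ s.length) :
    (if PySem.Chars.findFrom s ['\n'] (k : Int) (some (m : Int)) > -1 then
       (if PySem.Chars.strip (PySem.List.slice s (some (k : Int))
              (some (PySem.Chars.findFrom s ['\n'] (k : Int) (some (m : Int))))) ≠ [] ∧
           PySem.Chars.strip (PySem.List.slice s
              (some (PySem.Chars.findFrom s ['\n'] (k : Int) (some (m : Int)))) (some (m : Int))) ≠ [] then
          [(String.ofList (PySem.Chars.strip (PySem.List.slice s (some (k : Int))
              (some (PySem.Chars.findFrom s ['\n'] (k : Int) (some (m : Int)))))),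
            String.ofList (PySem.Chars.strip (PySem.List.slice s
              (some (PySem.Chars.findFrom s ['\n'] (k : Int) (some (m : Int)))) (some (m : Int)))))]
        else [])
     else []) = (eidarsiterBlock ((s.drop k).take (m - k))).toList := by
  rw [pv_findFrom_some s ['\n'] k m hk hm]
  set blk := (s.drop k).take (m - k) with hblk
  have hbl : blk.length = m - k := by
    rw [hblk]; simp only [List.length_take, List.length_drop]; omega
  by_cases h1 : PySem.Chars.find blk ['\n'] = -1
  · rw [if_pos h1, if_neg (by omega : ¬ ((-1 : Int) > -1))]
    simp [eidarsiterBlock, h1]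
  · have h0 : 0 ≤ PySem.Chars.find blk ['\n'] := by
      have := PySem.Chars.neg_one_le_find blk ['\n']; omega
    obtain ⟨fn, hfn⟩ : ∃ fn : Nat, PySem.Chars.find blk ['\n'] = (fn : Int) :=
      ⟨(PySem.Chars.find blk ['\n']).toNat, by omega⟩
    have hocc := (PySem.Chars.find_spec (s := blk) (sub := ['\n']) h0).1
    have hfl : fn + 1 ≤ blk.length := by
      have := hocc.length_le
      rw [hfn] at this
      simp only [List.length_cons, List.length_nil, List.length_drop, Int.toNat_natCast] at this
      omega
    have hfn_lt : fn < m - k := by omega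
    rw [if_neg h1, hfn, if_pos (by omega : (k : Int) + (fn : Int) > -1)]
    have e1 : PySem.List.slice s (some (k : Int)) (some ((k : Int) + (fn : Int))) = blk.take fn := by
      rw [(by push_cast; ring : (k : Int) + (fn : Int) = ((k + fn : Nat) : Int)),
          PySem.List.slice_natCast, hblk, List.take_take]
      rw [Nat.add_sub_cancel_left, Nat.min_eq_left (by omega)]
    have e2 : PySem.List.slice s (some ((k : Int) + (fn : Int))) (some (m : Int)) = blk.drop fn := by
      rw [(by push_cast; ring : (k : Int) + (fn : Int) = ((k + fn : Nat) : Int)),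
          PySem.List.slice_natCast, hblk, List.drop_take]
      rw [(by omega : m - (k + fn) = m - k - fn), ← List.drop_drop]
    have e3 : PySem.List.slice blk none (some (fn : Int)) = blk.take fn := by
      rw [PySem.List.slice_to blk (by omega), Int.toNat_natCast]
    have e4 : PySem.List.slice blk (some (fn : Int)) none = blk.drop fn := by
      rw [PySem.List.slice_from blk (by omega), Int.toNat_natCast]
    rw [e1, e2]
    simp only [eidarsiterBlock, hfn, if_neg (by omega : ¬ ((fn : Int) < 0)), e3, e4]
    split <;> simp

theorem pv_append_shape {α : Type} (c d : Prop) [Decidable c] [Decidable d] (p : α) (rest : List α) :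
    (if c then (if d then p :: rest else rest) else rest) =
      (if c then (if d then [p] else []) else []) ++ rest := by
  split
  · split <;> simp
  · simp

theorem pv_goA (fuel : Nat) :
    ∀ (s : List Char) (k : Nat), k ≤ s.length → s.length - k < fuel →
      eidarsiterGo s fuel (k : Int) = pvProc (s.drop k) := by
  induction fuel with
  | zero => intro s k hk hf; omega
  | succ fuel ih =>
    intro s k hk hf
    by_cases hlt : k < s.length
    case neg =>
      have hk' : k = s.length := by omega
      rw [pv_goA_past s (fuel + 1) (k : Int) (by omega), hk', List.drop_length, pvProc_nil]
    case pos =>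
      rw [eidarsiterGo, if_pos (by omega : (k : Int) < (s.length : Int))]
      rw [PySem.Chars.findFrom_natCast s ['\n', '\n'] k hk]
      simp only []
      set t := s.drop k with ht
      have htl : t.length = s.length - k := by rw [ht]; simp
      by_cases h1 : PySem.Chars.find t ['\n', '\n'] = -1
      · rw [if_pos h1, if_pos (by omega : (-1 : Int) < 0)]
        have hrest : eidarsiterGo s fuel ((s.length : Int) + 2) = [] :=
          pv_goA_past s fuel _ (by omega)
        rw [hrest]
        have hblk : (s.drop k).take (s.length - k) = t := by
          rw [← ht]; exact List.take_of_length_le (by omega)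
        have := pv_block_eq s k s.length (by omega) (by omega)
        rw [hblk] at this
        rw [pvProc, dif_pos (by rw [h1]; norm_num)]
        rw [← this]
      · have h0 : 0 ≤ PySem.Chars.find t ['\n', '\n'] := by
          have := PySem.Chars.neg_one_le_find t ['\n', '\n']; omega
        obtain ⟨fn, hfn⟩ : ∃ fn : Nat, PySem.Chars.find t ['\n', '\n'] = (fn : Int) :=
          ⟨(PySem.Chars.find t ['\n', '\n']).toNat, by omega⟩
        have hocc := (PySem.Chars.find_spec (s := t) (sub := ['\n', '\n']) h0).1
        have hfl : fn + 2 ≤ t.length := by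
          have := hocc.length_le
          rw [hfn] at this
          simp only [List.length_cons, List.length_nil, List.length_drop, Int.toNat_natCast] at this
          omega
        rw [if_neg h1, hfn, if_neg (by omega : ¬ ((k : Int) + (fn : Int) < 0))]
        have hcast : (k : Int) + (fn : Int) = ((k + fn : Nat) : Int) := by push_cast; ring
        have hrest : eidarsiterGo s fuel ((k : Int) + (fn : Int) + 2) =
            pvProc (s.drop (k + fn + 2)) := by
          rw [(by push_cast; ring : (k : Int) + (fn : Int) + 2 = ((k + fn + 2 : Nat) : Int))]
          exact ih s (k + fn + 2) (by omega) (by omega)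
        rw [hrest]
        have hdrop : s.drop (k + fn + 2) = t.drop (fn + 2) := by
          rw [ht, List.drop_drop]; ring_nf
        have hblk : (s.drop k).take (k + fn - k) = t.take fn := by
          rw [← ht, Nat.add_sub_cancel_left]
        have hbe := pv_block_eq s k (k + fn) (by omega) (by omega)
        rw [hblk] at hbe
        conv_rhs => rw [pvProc]
        rw [dif_neg (by rw [hfn]; omega), hfn, Int.toNat_natCast, ← hdrop]
        rw [hcast, pv_append_shape, hbe]

-- ===== VERDICT (by name: the statement is the Claim_ definition above) =====
theorem eidarsiter_spec : Claim_equal_eidarsiter := by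
  intro responsetext _
  unfold Spec_eidarsiter eidarsiter eidarsiter_alt
  rw [pv_splitOn_eq, ← pv_proc_filterMap]
  have := pv_goA (responsetext.toList.length + 1) responsetext.toList 0 (by omega) (by omega)
  simpa using this
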